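-- pv_equiv track=rewrite | github.com/pureview/workspace | ID3/master.py | split_sets
-- ===== SOURCE A (Python) =====
-- def split_sets(mat,col):
--     rt={}
--     name_row=mat[0][:col]+mat[0][col+1:]
--     for i in range(1,len(mat)):
--         if mat[i][col] in rt:
--             rt[mat[i][col]].append(mat[i][:col]+mat[i][col+1:])
--         else:
--             rt[mat[i][col]]=[name_row]
--             rt[mat[i][col]].append(mat[i][:col]+mat[i][col+1:])
--     return  rt
-- ===== SOURCE B (Python) =====
-- def split_sets(mat, col):
--     name_row = mat[0][:col] + mat[0][col+1:]
--     order = []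
--     for row in mat[1:]:
--         v = row[col]
--         if v not in order:
--             order.append(v)
--     return {v: [name_row] + [row[:col] + row[col+1:] for row in mat[1:] if row[col] == v]
--             for v in order}
-- ===== Notes on version B (the rewrite author's own statement) =====
-- stated objective: alternative
-- what changed: B drops A's dict entirely: phase one collects the distinct column values in first-appearance order into a list, phase two builds each group by an independent filtering scan of mat[1:] per value (nested scans instead of one hash-grouping pass).
import Mathlib
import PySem

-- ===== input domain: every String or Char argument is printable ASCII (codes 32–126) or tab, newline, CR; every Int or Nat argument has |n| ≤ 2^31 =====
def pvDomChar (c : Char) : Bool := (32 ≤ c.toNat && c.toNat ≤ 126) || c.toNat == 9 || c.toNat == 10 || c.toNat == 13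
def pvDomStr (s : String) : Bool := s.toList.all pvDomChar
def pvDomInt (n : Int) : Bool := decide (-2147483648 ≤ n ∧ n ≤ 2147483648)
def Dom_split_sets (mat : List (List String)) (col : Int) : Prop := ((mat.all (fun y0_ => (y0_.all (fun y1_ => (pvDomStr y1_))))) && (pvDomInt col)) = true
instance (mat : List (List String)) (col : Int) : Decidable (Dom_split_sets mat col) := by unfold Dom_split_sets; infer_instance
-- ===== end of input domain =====

-- B replaces A's one-pass dict grouping by a dict-free two-phase algorithm: collect the distinct
-- column values in first-appearance order, then build each group by filtering the whole matrix;
-- return values are proved equal wherever A returns.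

-- ===== PORT A =====
-- loop body of A: one iteration over row = mat[i]
def pvStepA (name_row : List String) (col : Int)
    (rt : PySem.Dict String (List (List String))) (row : List String) :
    PySem.Dict String (List (List String)) :=
  let key := PySem.List.pyGetD row col ""
  if rt.contains key then
    rt.modify key [] (fun v => v ++ [PySem.List.slice row none (some col) ++ PySem.List.slice row (some (col + 1)) none])
  else
    (rt.insert key [name_row]).modify key []
      (fun v => v ++ [PySem.List.slice row none (some col) ++ PySem.List.slice row (some (col + 1)) none])

def split_sets (mat : List (List String)) (col : Int) : List (String × List (List String)) :=
  let name_row := PySem.List.slice (PySem.List.pyGetD mat 0 []) none (some col)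
      ++ PySem.List.slice (PySem.List.pyGetD mat 0 []) (some (col + 1)) none
  ((PySem.List.pyRange 1 (PySem.List.len mat)).foldl
    (fun rt i => pvStepA name_row col rt (PySem.List.pyGetD mat i [])) PySem.Dict.empty).items

-- ===== PORT B =====
def split_sets_alt (mat : List (List String)) (col : Int) : List (String × List (List String)) :=
  let name_row := PySem.List.slice (PySem.List.pyGetD mat 0 []) none (some col)
      ++ PySem.List.slice (PySem.List.pyGetD mat 0 []) (some (col + 1)) none
  let rows := PySem.List.slice mat (some 1) none
  -- phase 1: the distinct column values, in first-appearance order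
  let order : List String := rows.foldl (fun ks row =>
      let v := PySem.List.pyGetD row col ""
      if ks.contains v then ks else ks ++ [v]) []
  -- phase 2: one filtering scan of the rows per distinct value
  order.map (fun v => (v, name_row ::
      (rows.filter (fun row => PySem.List.pyGetD row col "" == v)).map
        (fun row => PySem.List.slice row none (some col) ++ PySem.List.slice row (some (col + 1)) none)))

-- ===== PRECONDITION & SPEC =====
-- Pre_ excludes exactly the inputs where the Python A raises: the empty matrix (mat[0] → IndexError)
-- and any data row for which mat[i][col] is out of range (IndexError).
def Pre_split_sets (mat : List (List String)) (col : Int) : Prop :=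
  mat ≠ [] ∧ ∀ row ∈ mat.drop 1, PySem.Raise.InRange row.length col
instance (mat : List (List String)) (col : Int) : Decidable (Pre_split_sets mat col) := by
  unfold Pre_split_sets; infer_instance

def pvWitness_split_sets : List (List String) × Int :=
  ([["name", "cls"], ["a", "x"], ["b", "y"], ["c", "x"]], 1)

def Spec_split_sets (mat : List (List String)) (col : Int) (out : List (String × List (List String))) : Prop := out = split_sets_alt mat col
instance (mat : List (List String)) (col : Int) (out : List (String × List (List String))) : Decidable (Spec_split_sets mat col out) := by unfold Spec_split_sets; infer_instance

-- ===== CLAIM (what is proved, stated in full; the proofs are below) =====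
def Claim_equal_split_sets : Prop := ∀ (mat : List (List String)) (col : Int), Dom_split_sets mat col → Pre_split_sets mat col → Spec_split_sets mat col (split_sets mat col)

-- ===== LEMMAS AND PROOFS =====

-- abbreviations used only in the proofs
def pvKey (col : Int) (row : List String) : String := PySem.List.pyGetD row col ""
def pvStrip (col : Int) (row : List String) : List String :=
  PySem.List.slice row none (some col) ++ PySem.List.slice row (some (col + 1)) none

-- A's branching step is a single dict 'modify' with default [name_row]
lemma pv_stepA_eq_modify (nr : List String) (col : Int)
    (rt : PySem.Dict String (List (List String))) (row : List String) :
    pvStepA nr col rt row = rt.modify (pvKey col row) [nr] (fun v => v ++ [pvStrip col row]) := by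
  simp only [pvStepA, pvKey, pvStrip, PySem.Dict.modify]
  by_cases hc : rt.contains (PySem.List.pyGetD row col "") = true
  · obtain ⟨w, hw⟩ : ∃ w, rt.get? (PySem.List.pyGetD row col "") = some w := by
      rw [PySem.Dict.contains_eq_isSome_get?] at hc
      exact Option.isSome_iff_exists.mp hc
    simp [hc, PySem.Dict.getD_eq_get?_getD, hw]
  · have hcf : rt.contains (PySem.List.pyGetD row col "") = false := (Bool.not_eq_true _).mp hc
    simp only [hcf, Bool.false_eq_true, if_false, PySem.Dict.getD_insert_self,
      PySem.Dict.insert_insert_self, PySem.Dict.getD_of_not_contains rt [nr] hcf]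

-- the value stored at c after A's whole loop is the filtered, stripped rows (after the default)
lemma pv_getD_fold (col : Int) (nr : List String) (rows : List (List String))
    (d : PySem.Dict String (List (List String))) (c : String) :
    (rows.foldl (fun d r => d.modify (pvKey col r) [nr] (fun v => v ++ [pvStrip col r])) d).getD c [nr]
      = d.getD c [nr] ++ (rows.filter (fun r => pvKey col r == c)).map (pvStrip col) := by
  induction rows generalizing d with
  | nil => simp
  | cons r t ih =>
      simp only [List.foldl_cons, List.filter_cons]
      rw [ih]
      by_cases h : c = pvKey col r
      · have hb : (pvKey col r == c) = true := by simp [h]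
        rw [PySem.Dict.getD_modify]
        simp [h]
      · have hb : (pvKey col r == c) = false := beq_eq_false_iff_ne.mpr (fun e => h e.symm)
        rw [PySem.Dict.getD_modify, if_neg h]
        split_ifs with hx
        · simp [hb] at hx
        · rfl

-- ===== VERDICT (by name: the statement is the Claim_ definition above) =====
theorem split_sets_spec : Claim_equal_split_sets := by
  intro mat col _ _
  unfold Spec_split_sets split_sets split_sets_alt
  simp only []
  set nr := PySem.List.slice (PySem.List.pyGetD mat 0 []) none (some col)
      ++ PySem.List.slice (PySem.List.pyGetD mat 0 []) (some (col + 1)) none with hnr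
  rw [PySem.List.slice_from mat (by norm_num : (0:Int) ≤ 1),
      PySem.List.foldl_pyRange_pyGetD mat [] (pvStepA nr col) PySem.Dict.empty (by norm_num : (0:Int) ≤ 1)]
  set rows := mat.drop (1 : Int).toNat with hrows
  -- A's loop in 'modify' form
  have hfun : (pvStepA nr col)
      = (fun d r => d.modify (pvKey col r) [nr] (fun v => v ++ [pvStrip col r])) := by
    funext rt row; exact pv_stepA_eq_modify nr col rt row
  rw [hfun]
  -- items of the final dict, keyed in first-appearance order
  have hnodup := PySem.Dict.nodup_keys_foldl_modify_key rows (pvKey col) [nr]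
      (fun _ r => (fun v => v ++ [pvStrip col r])) PySem.Dict.empty
      (by simp)
  rw [PySem.Dict.items_eq_map_keys _ hnodup [nr]]
  rw [PySem.Dict.keys_foldl_modify_key rows (pvKey col) [nr]
      (fun _ r => (fun v => v ++ [pvStrip col r])) PySem.Dict.empty]
  -- B's first phase is exactly Set.update [] (rows.map key)
  have horder : (rows.foldl (fun ks row =>
      let v := PySem.List.pyGetD row col ""
      if ks.contains v then ks else ks ++ [v]) ([] : List String))
      = PySem.Set.update (PySem.Dict.empty (κ := String) (ν := List (List String))).keys (rows.map (pvKey col)) := by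
    rw [PySem.Set.update_map_eq_foldl_add]
    simp [PySem.Set.add, pvKey, PySem.Dict.keys_empty]
  rw [← horder]
  -- the per-key values agree
  apply List.map_congr_left
  intro c _
  rw [pv_getD_fold]
  simp [pvKey, pvStrip, PySem.Dict.getD_empty]
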